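-- pv_equiv track=rewrite | github.com/mm-110/blender_addon_template | setup.py | select_blender_version
-- ===== SOURCE A (Python) =====
-- def select_blender_version(bl_info, available_versions):
--     major, minor, patch = bl_info['blender']
--
--     major_versions = [v for v in available_versions if v.startswith(f"{major}.")]
--
--     if not major_versions:
--         return "No versions found"
--
--     if len(major_versions) == 1:
--         return major_versions[0]
--
--     minor_versions = [v for v in major_versions if f"{major}.{minor}" in v]
--
--     if not minor_versions:
--         return "No versions found"
--
--     if len(minor_versions) == 1:
--         return minor_versions[0]
--
--     patch_versions = [v for v in minor_versions if f"{major}.{minor}.{patch}" in v]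
--
--     if not patch_versions:
--         return "No versions found"
--
--     if len(patch_versions) == 1:
--         return patch_versions[0]
-- ===== SOURCE B (Python) =====
-- def select_blender_version(bl_info, available_versions):
--     major, minor, patch = bl_info['blender']
--     levels = [(True, f"{major}."),
--               (False, f"{major}.{minor}"),
--               (False, f"{major}.{minor}.{patch}")]
--     return _narrow(available_versions, levels)
--
-- def _narrow(current, levels):
--     if not levels:
--         return None
--     is_prefix, pat = levels[0]
--     current = [v for v in current
--                if (v.startswith(pat) if is_prefix else pat in v)]
--     if not current:
--         return "No versions found"
--     if len(current) == 1:
--         return current[0]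
--     return _narrow(current, levels[1:])
-- ===== Notes on version B (the rewrite author's own statement) =====
-- stated objective: simpler
-- what changed: Replaces the three copy-pasted filter/empty/singleton blocks by one recursive narrowing helper driven by a list of (match-mode, pattern) levels.
import Mathlib
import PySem

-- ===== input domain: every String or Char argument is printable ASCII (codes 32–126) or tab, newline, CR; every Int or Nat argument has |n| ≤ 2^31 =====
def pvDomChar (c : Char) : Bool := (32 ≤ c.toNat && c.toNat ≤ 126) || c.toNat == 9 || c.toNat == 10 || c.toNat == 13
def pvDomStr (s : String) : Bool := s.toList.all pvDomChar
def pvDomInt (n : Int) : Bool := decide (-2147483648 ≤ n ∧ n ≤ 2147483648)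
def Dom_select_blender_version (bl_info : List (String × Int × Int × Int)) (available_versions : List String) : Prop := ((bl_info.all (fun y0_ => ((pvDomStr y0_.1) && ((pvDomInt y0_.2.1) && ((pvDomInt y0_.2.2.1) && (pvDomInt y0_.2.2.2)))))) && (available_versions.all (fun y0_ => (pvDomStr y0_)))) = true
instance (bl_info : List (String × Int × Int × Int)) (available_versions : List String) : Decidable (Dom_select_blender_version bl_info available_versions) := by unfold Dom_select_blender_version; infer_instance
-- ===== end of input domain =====

-- B replaces A's three copy-pasted filter/empty/singleton blocks by one recursive
-- narrowing helper over a list of (match-mode, pattern) levels (objective: simpler).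

-- ===== PORT A =====
def select_blender_version (bl_info : List (String × Int × Int × Int)) (available_versions : List String) : Option String :=
  match (PySem.Dict.mk bl_info).get? "blender" with
  | none => none  -- KeyError in Python; excluded by Pre_
  | some (major, minor, patch) =>
    let major_versions := available_versions.filter
      (fun v => PySem.Str.startswith v (PySem.Int.toStr major ++ "."))
    if major_versions.length = 0 then some "No versions found"
    else if major_versions.length = 1 then major_versions.head?
    else
      let minor_versions := major_versions.filter
        (fun v => PySem.Str.isIn (PySem.Int.toStr major ++ "." ++ PySem.Int.toStr minor) v)
      if minor_versions.length = 0 then some "No versions found"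
      else if minor_versions.length = 1 then minor_versions.head?
      else
        let patch_versions := minor_versions.filter
          (fun v => PySem.Str.isIn (PySem.Int.toStr major ++ "." ++ PySem.Int.toStr minor ++ "." ++ PySem.Int.toStr patch) v)
        if patch_versions.length = 0 then some "No versions found"
        else if patch_versions.length = 1 then patch_versions.head?
        else none

-- ===== PORT B =====
def sbv_narrow (current : List String) (levels : List (Bool × String)) : Option String :=
  match levels with
  | [] => none
  | (isPrefix, pat) :: rest =>
    let cur := current.filter
      (fun v => if isPrefix then PySem.Str.startswith v pat else PySem.Str.isIn pat v)
    match cur with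
    | [] => some "No versions found"
    | [x] => some x
    | _ => sbv_narrow cur rest

def select_blender_version_alt (bl_info : List (String × Int × Int × Int)) (available_versions : List String) : Option String :=
  match (PySem.Dict.mk bl_info).get? "blender" with
  | none => none  -- KeyError in Python; excluded by Pre_
  | some (major, minor, patch) =>
    let levels : List (Bool × String) :=
      [(true,  PySem.Int.toStr major ++ "."),
       (false, PySem.Int.toStr major ++ "." ++ PySem.Int.toStr minor),
       (false, PySem.Int.toStr major ++ "." ++ PySem.Int.toStr minor ++ "." ++ PySem.Int.toStr patch)]
    sbv_narrow available_versions levels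

-- ===== PRECONDITION & SPEC =====
-- Pre_ excludes only the inputs where bl_info has no 'blender' key, on which Python A raises KeyError.
def Pre_select_blender_version (bl_info : List (String × Int × Int × Int)) (_available_versions : List String) : Prop :=
  (PySem.Dict.mk bl_info).contains "blender" = true
instance (bl_info : List (String × Int × Int × Int)) (available_versions : List String) : Decidable (Pre_select_blender_version bl_info available_versions) := by unfold Pre_select_blender_version; infer_instance
def pvWitness_select_blender_version : (List (String × Int × Int × Int)) × List String :=
  ([("blender", 4, 1, 0)], ["4.1", "4.2"])

def Spec_select_blender_version (bl_info : List (String × Int × Int × Int)) (available_versions : List String) (out : Option String) : Prop := out = select_blender_version_alt bl_info available_versions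
instance (bl_info : List (String × Int × Int × Int)) (available_versions : List String) (out : Option String) : Decidable (Spec_select_blender_version bl_info available_versions out) := by unfold Spec_select_blender_version; infer_instance

-- ===== CLAIM (what is proved, stated in full; the proofs are below) =====
def Claim_equal_select_blender_version : Prop := ∀ (bl_info : List (String × Int × Int × Int)) (available_versions : List String), Dom_select_blender_version bl_info available_versions → Pre_select_blender_version bl_info available_versions → Spec_select_blender_version bl_info available_versions (select_blender_version bl_info available_versions)

-- ===== LEMMAS AND PROOFS =====
-- One level of A's staged if/filter chain equals one unfolding of sbv_narrow's match.
theorem sbv_match_eq (l : List String) (k : Option String) :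
    (match l with | [] => some "No versions found" | [x] => some x | _ => k)
    = (if l.length = 0 then some "No versions found"
       else if l.length = 1 then l.head? else k) := by
  match l with
  | [] => simp
  | [x] => simp
  | x :: y :: rest => simp

-- ===== VERDICT (by name: the statement is the Claim_ definition above) =====
theorem select_blender_version_spec : Claim_equal_select_blender_version := by
  intro bl_info available_versions _ _
  unfold Spec_select_blender_version select_blender_version select_blender_version_alt
  cases (PySem.Dict.mk bl_info).get? "blender" with
  | none => rfl
  | some t =>
    obtain ⟨major, minor, patch⟩ := t
    simp only [sbv_narrow, sbv_match_eq, if_true, Bool.false_eq_true, if_false]
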